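-- pv_equiv track=rewrite | github.com/iperry5224/TestZippr | slyk_deploy_extract/slyk/lambda_functions/remediate_new.py | _generate_au6_scripts
-- ===== SOURCE A (Python) =====
-- def _generate_au6_scripts(issues):
--     """Generate remediation scripts for AU-6 issues."""
--     scripts = []
--
--     if any(i["type"] == "no_cloudtrail" for i in issues):
--         scripts.append("# Create CloudTrail trail")
--         scripts.append("aws cloudtrail create-trail --name security-audit-trail --s3-bucket-name YOUR_BUCKET --is-multi-region-trail --enable-log-file-validation")
--         scripts.append("aws cloudtrail start-logging --name security-audit-trail")
--
--     not_logging = [i for i in issues if i["type"] == "cloudtrail_not_logging"]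
--     for issue in not_logging:
--         scripts.append(f"aws cloudtrail start-logging --name {issue['trail']}")
--
--     missing_alarms = [i for i in issues if i["type"] == "missing_alarm"]
--     if missing_alarms:
--         scripts.append("")
--         scripts.append("# Create security monitoring alarms")
--         scripts.append("# These require a CloudWatch Logs log group from CloudTrail")
--         for alarm in missing_alarms:
--             scripts.append(f"# Missing alarm for: {alarm['alarm']}")
--
--     return scripts
-- ===== SOURCE B (Python) =====
-- def _generate_au6_scripts(issues):
--     """Single pass over issues builds category buckets, then a separate emit phase."""
--     has_no_cloudtrail = False
--     not_logging = []
--     missing_alarms = []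
--     for i in issues:
--         t = i["type"]
--         if t == "no_cloudtrail":
--             has_no_cloudtrail = True
--         elif t == "cloudtrail_not_logging":
--             not_logging.append(i["trail"])
--         elif t == "missing_alarm":
--             missing_alarms.append(i["alarm"])
--     scripts = []
--     if has_no_cloudtrail:
--         scripts += [
--             "# Create CloudTrail trail",
--             "aws cloudtrail create-trail --name security-audit-trail --s3-bucket-name YOUR_BUCKET --is-multi-region-trail --enable-log-file-validation",
--             "aws cloudtrail start-logging --name security-audit-trail",
--         ]
--     scripts += [f"aws cloudtrail start-logging --name {t}" for t in not_logging]
--     if missing_alarms: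
--         scripts += [
--             "",
--             "# Create security monitoring alarms",
--             "# These require a CloudWatch Logs log group from CloudTrail",
--         ]
--         scripts += [f"# Missing alarm for: {a}" for a in missing_alarms]
--     return scripts
-- ===== Notes on version B (the rewrite author's own statement) =====
-- stated objective: alternative
-- what changed: Replaces A's four separate scans of issues (an any() plus two list comprehensions, each re-reading every dict) by one pass that dispatches on i['type'] into category buckets (a flag and two name lists), followed by a separate emit phase.
import Mathlib
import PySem

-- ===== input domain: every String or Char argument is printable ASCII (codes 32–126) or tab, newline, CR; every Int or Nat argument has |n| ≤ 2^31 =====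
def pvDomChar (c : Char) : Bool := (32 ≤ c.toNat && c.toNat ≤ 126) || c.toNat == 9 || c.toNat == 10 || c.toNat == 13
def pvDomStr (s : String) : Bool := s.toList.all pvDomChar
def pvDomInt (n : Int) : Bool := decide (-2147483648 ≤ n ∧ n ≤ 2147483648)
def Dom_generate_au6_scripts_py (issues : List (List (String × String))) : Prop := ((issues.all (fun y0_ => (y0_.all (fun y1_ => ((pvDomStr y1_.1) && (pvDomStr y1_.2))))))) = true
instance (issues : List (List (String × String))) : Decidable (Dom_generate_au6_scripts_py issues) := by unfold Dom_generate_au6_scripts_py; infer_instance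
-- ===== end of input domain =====

-- B builds category buckets in ONE pass over `issues` and emits afterwards, instead of
-- A's four separate scans (any() plus two comprehensions); equal cost, different decomposition.
-- (Inputs on which Python A raises KeyError are excluded by Pre_ below.)

-- ===== PORT A =====
-- shared helper: d[k] for a dict given as an association list (first match); Pre_ guarantees the key exists
def pyGetS (d : List (String × String)) (k : String) : String :=
  ((d.find? (fun p => p.1 == k)).map (·.2)).getD ""

def generate_au6_scripts_py (issues : List (List (String × String))) : List String :=
  let scripts : List String := []
  let scripts := if issues.any (fun i => pyGetS i "type" == "no_cloudtrail") then
      scripts ++ ["# Create CloudTrail trail",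
        "aws cloudtrail create-trail --name security-audit-trail --s3-bucket-name YOUR_BUCKET --is-multi-region-trail --enable-log-file-validation",
        "aws cloudtrail start-logging --name security-audit-trail"]
    else scripts
  let not_logging := issues.filter (fun i => pyGetS i "type" == "cloudtrail_not_logging")
  let scripts := not_logging.foldl (fun s issue => s ++ ["aws cloudtrail start-logging --name " ++ pyGetS issue "trail"]) scripts
  let missing_alarms := issues.filter (fun i => pyGetS i "type" == "missing_alarm")
  let scripts := if missing_alarms ≠ [] then
      let scripts := scripts ++ ["", "# Create security monitoring alarms",
        "# These require a CloudWatch Logs log group from CloudTrail"]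
      missing_alarms.foldl (fun s alarm => s ++ ["# Missing alarm for: " ++ pyGetS alarm "alarm"]) scripts
    else scripts
  scripts

-- ===== PORT B =====
-- single pass: (has_no_cloudtrail, not_logging trail names, missing alarm names)
def stepAU6 (st : Bool × List String × List String) (i : List (String × String)) :
    Bool × List String × List String :=
  let t := pyGetS i "type"
  if t == "no_cloudtrail" then (true, st.2.1, st.2.2)
  else if t == "cloudtrail_not_logging" then (st.1, st.2.1 ++ [pyGetS i "trail"], st.2.2)
  else if t == "missing_alarm" then (st.1, st.2.1, st.2.2 ++ [pyGetS i "alarm"])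
  else st

def collectAU6 (issues : List (List (String × String))) : Bool × List String × List String :=
  issues.foldl stepAU6 (false, [], [])

def generate_au6_scripts_py_alt (issues : List (List (String × String))) : List String :=
  let st := collectAU6 issues
  (if st.1 then
      ["# Create CloudTrail trail",
       "aws cloudtrail create-trail --name security-audit-trail --s3-bucket-name YOUR_BUCKET --is-multi-region-trail --enable-log-file-validation",
       "aws cloudtrail start-logging --name security-audit-trail"]
    else [])
  ++ st.2.1.map (fun t => "aws cloudtrail start-logging --name " ++ t)
  ++ (if st.2.2 ≠ [] then
        ["", "# Create security monitoring alarms",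
         "# These require a CloudWatch Logs log group from CloudTrail"]
        ++ st.2.2.map (fun a => "# Missing alarm for: " ++ a)
      else [])

-- ===== PRECONDITION & SPEC =====
-- Pre_ excludes exactly the inputs on which Python A raises KeyError: an issue without a
-- "type" key, or a "cloudtrail_not_logging"/"missing_alarm" issue without its "trail"/"alarm" key.
def Pre_generate_au6_scripts_py (issues : List (List (String × String))) : Prop :=
  ∀ i ∈ issues, (i.find? (fun p => p.1 == "type")).isSome
    ∧ (pyGetS i "type" = "cloudtrail_not_logging" → (i.find? (fun p => p.1 == "trail")).isSome)
    ∧ (pyGetS i "type" = "missing_alarm" → (i.find? (fun p => p.1 == "alarm")).isSome)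
instance (issues : List (List (String × String))) : Decidable (Pre_generate_au6_scripts_py issues) := by unfold Pre_generate_au6_scripts_py; infer_instance

def pvWitness_generate_au6_scripts_py : (List (List (String × String))) :=
  [[("type", "no_cloudtrail")], [("type", "missing_alarm"), ("alarm", "UnauthorizedAPICalls")],
   [("type", "cloudtrail_not_logging"), ("trail", "t1")], [("type", "other")]]

def Spec_generate_au6_scripts_py (issues : List (List (String × String))) (out : List String) : Prop := out = generate_au6_scripts_py_alt issues
instance (issues : List (List (String × String))) (out : List String) : Decidable (Spec_generate_au6_scripts_py issues out) := by unfold Spec_generate_au6_scripts_py; infer_instance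

-- ===== CLAIM (what is proved, stated in full; the proofs are below) =====
def Claim_equal_generate_au6_scripts_py : Prop := ∀ (issues : List (List (String × String))), Dom_generate_au6_scripts_py issues → Pre_generate_au6_scripts_py issues → Spec_generate_au6_scripts_py issues (generate_au6_scripts_py issues)

-- ===== LEMMAS AND PROOFS =====

lemma foldl_append_map {α : Type} (f : α → String) :
    ∀ (l : List α) (s : List String),
      l.foldl (fun s x => s ++ [f x]) s = s ++ l.map f := by
  intro l
  induction l with
  | nil => simp
  | cons x xs ih => intro s; simp [ih]

lemma collectAU6_go :
    ∀ (issues : List (List (String × String))) (h : Bool) (nl ma : List String),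
      issues.foldl stepAU6 (h, nl, ma) =
      (h || issues.any (fun i => pyGetS i "type" == "no_cloudtrail"),
       nl ++ (issues.filter (fun i => pyGetS i "type" == "cloudtrail_not_logging")).map (fun i => pyGetS i "trail"),
       ma ++ (issues.filter (fun i => pyGetS i "type" == "missing_alarm")).map (fun i => pyGetS i "alarm")) := by
  intro issues
  induction issues with
  | nil => simp
  | cons i rest ih =>
    intro h nl ma
    rw [List.foldl_cons]
    by_cases h1 : pyGetS i "type" = "no_cloudtrail"
    · have hs : stepAU6 (h, nl, ma) i = (true, nl, ma) := by simp [stepAU6, h1]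
      rw [hs, ih]
      simp [h1]
    · by_cases h2 : pyGetS i "type" = "cloudtrail_not_logging"
      · have hs : stepAU6 (h, nl, ma) i = (h, nl ++ [pyGetS i "trail"], ma) := by
          simp [stepAU6, h2]
        rw [hs, ih]
        simp [h2]
      · by_cases h3 : pyGetS i "type" = "missing_alarm"
        · have hs : stepAU6 (h, nl, ma) i = (h, nl, ma ++ [pyGetS i "alarm"]) := by
            simp [stepAU6, h3]
          rw [hs, ih]
          simp [h3]
        · have hs : stepAU6 (h, nl, ma) i = (h, nl, ma) := by simp [stepAU6, h1, h2, h3]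
          rw [hs, ih]
          have hb1 : (pyGetS i "type" == "no_cloudtrail") = false := beq_eq_false_iff_ne.mpr h1
          simp [hb1, h2, h3]

lemma collectAU6_eq (issues : List (List (String × String))) :
    collectAU6 issues =
      (issues.any (fun i => pyGetS i "type" == "no_cloudtrail"),
       (issues.filter (fun i => pyGetS i "type" == "cloudtrail_not_logging")).map (fun i => pyGetS i "trail"),
       (issues.filter (fun i => pyGetS i "type" == "missing_alarm")).map (fun i => pyGetS i "alarm")) := by
  simpa [collectAU6] using collectAU6_go issues false [] []

-- ===== VERDICT (by name: the statement is the Claim_ definition above) =====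
theorem generate_au6_scripts_py_spec : Claim_equal_generate_au6_scripts_py := by
  intro issues _ _
  unfold Spec_generate_au6_scripts_py generate_au6_scripts_py generate_au6_scripts_py_alt
  rw [collectAU6_eq]
  simp only [foldl_append_map]
  by_cases hany : issues.any (fun i => pyGetS i "type" == "no_cloudtrail")
  · by_cases hma : (issues.filter (fun i => pyGetS i "type" == "missing_alarm")) = []
    · simp [hany, hma]
    · simp [hany, hma, List.map_map, Function.comp_def]
  · by_cases hma : (issues.filter (fun i => pyGetS i "type" == "missing_alarm")) = []
    · simp [hany, hma]
    · simp [hany, hma, List.map_map, Function.comp_def]
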